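/- GENERATED by farm/mkstatement.py from design/units.tsv (unit `vorbis_pump_first_frame`) and the Specs of Vorbis/Spec/*.lean — do not edit.
   THE STATEMENT of the proof unit `vorbis_pump_first_frame`: the function `vorbis_pump_first_frame` (34 instructions) satisfies its contract,
   given the contracts of its callees. What the names mean: Vorbis/Spec/Basic.lean. The theorem to prove:
   `theorem vorbis_pump_first_frame_ok : Vorbis.Spec.vorbis_pump_first_frame.Statement`. -/
import Vorbis.Spec.Top
namespace Vorbis.Spec.vorbis_pump_first_frame
open X86 X86.User Asan

/-- The statement of unit `vorbis_pump_first_frame`. -/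
def Statement : Prop :=
  ∀ (Lay : Layout) (_hLay : Lay.hi = 0x1000000) (μ : Microarch) (_hμ : UserX.MicroOK μ) (u₀ : State)
    (_hcode : HasCodeNat Lay u₀ Vorbis.L.vorbis_pump_first_frame.entry Vorbis.Code.code_vorbis_pump_first_frame.nat Vorbis.L.vorbis_pump_first_frame.size)
    (_h_vorbis_decode_packet : ∀ (others : List Obj) (frames : List (Nat × FrameLayout)) (len : Nat) (A : Arena) (stored room : Int) (ysz : Nat → Nat), Calls Lay μ Vorbis.WayInv (Vorbis.conv u₀) Vorbis.L.vorbis_decode_packet.entry (Vorbis.Spec.vorbis_decode_packet.spec others frames len A stored room ysz))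
    (_h_vorbis_finish_frame : ∀ (others : List Obj) (frames : List (Nat × FrameLayout)) (len : Nat) (A : Arena) (stored room : Int) (ysz : Nat → Nat), Calls Lay μ Vorbis.WayInv (Vorbis.conv u₀) Vorbis.L.vorbis_finish_frame.entry (Vorbis.Spec.vorbis_finish_frame.spec others frames len A stored room ysz)),
    ∀ (others : List Obj) (frames : List (Nat × FrameLayout)) (len : Nat) (A : Arena) (stored room : Int) (ysz : Nat → Nat), Calls Lay μ Vorbis.WayInv (Vorbis.conv u₀) Vorbis.L.vorbis_pump_first_frame.entry (Vorbis.Spec.vorbis_pump_first_frame.spec others frames len A stored room ysz)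

end Vorbis.Spec.vorbis_pump_first_frame
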